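-- pv_equiv track=rewrite | github.com/rodrigoanasco/solutions_CSES_Data_Structures | Week3/bit_string.py | pair_maker
-- ===== SOURCE A (Python) =====
-- def pair_maker(bits):
--     if len(bits) < 1:
--         return 0
--
--     sum = 0
--     count = 0
--     temp = bits[0]
--
--     for i in range(0, len(bits)):
--         temp = bits[i]
--         if temp == "0":
--             sum += 1
--         if temp == "1":
--             count = count + sum
--
--     return count
-- ===== SOURCE B (Python) =====
-- def pair_maker(bits):
--     ones = sum(ch == "1" for ch in bits)
--     total = 0
--     for ch in bits:
--         if ch == "1":
--             ones -= 1
--         elif ch == "0":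
--             total += ones
--     return total
-- ===== Notes on version B (the rewrite author's own statement) =====
-- stated objective: alternative
-- what changed: B counts for every '0' the number of '1's that follow it (pre-counting the total ones, then decrementing), the complementary decomposition of A's running count of '0's before each '1'.
import Mathlib
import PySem

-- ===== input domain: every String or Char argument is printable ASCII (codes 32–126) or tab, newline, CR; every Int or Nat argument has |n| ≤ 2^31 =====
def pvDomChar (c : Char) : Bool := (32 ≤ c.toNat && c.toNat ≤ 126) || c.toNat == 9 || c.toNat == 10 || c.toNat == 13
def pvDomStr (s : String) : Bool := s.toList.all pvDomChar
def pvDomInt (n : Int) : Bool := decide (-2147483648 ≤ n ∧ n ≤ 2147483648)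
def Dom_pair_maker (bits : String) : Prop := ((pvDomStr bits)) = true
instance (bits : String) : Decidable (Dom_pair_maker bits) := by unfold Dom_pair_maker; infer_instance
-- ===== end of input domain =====

-- B counts, for every '0', the ones that follow it (pre-counted then decremented) — the
-- complementary decomposition of A's running count of zeros before each '1'. Same value, same cost.

-- ===== PORT A =====
-- for i in range(0, len(bits)): temp = bits[i]; if temp=="0": sum += 1; if temp=="1": count += sum
def pair_maker (bits : String) : Int :=
  if PySem.Str.len bits < 1 then 0
  else
    let l := bits.toList
    let res := (PySem.List.pyRange 0 (PySem.Str.len bits) 1).foldl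
      (fun (sc : Int × Int) i =>
        let temp := PySem.List.pyGetD l i ' '   -- bits[i]; i is always in range here
        let s := if temp = '0' then sc.1 + 1 else sc.1
        let c := if temp = '1' then sc.2 + s else sc.2
        (s, c)) (0, 0)
    res.2

-- ===== PORT B =====
-- ones = sum(ch == "1" for ch in bits); then one pass: '1' decrements ones, '0' adds ones to total
def pair_maker_alt (bits : String) : Int :=
  let l := bits.toList
  let ones : Int := l.count '1'
  (l.foldl
    (fun (ra : Int × Int) ch =>
      if ch = '1' then (ra.1 - 1, ra.2)
      else if ch = '0' then (ra.1, ra.2 + ra.1)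
      else ra) (ones, 0)).2

-- ===== PRECONDITION & SPEC =====
def Spec_pair_maker (bits : String) (out : Int) : Prop := out = pair_maker_alt bits
instance (bits : String) (out : Int) : Decidable (Spec_pair_maker bits out) := by unfold Spec_pair_maker; infer_instance

-- ===== CLAIM (what is proved, stated in full; the proofs are below) =====
def Claim_equal_pair_maker : Prop := ∀ (bits : String), Dom_pair_maker bits → Spec_pair_maker bits (pair_maker bits)

-- ===== LEMMAS AND PROOFS =====

-- number of (i,j) pairs with i<j, l[i]='0', l[j]='1'
def pairsZ : List Char → Int
  | [] => 0
  | c :: t => (if c = '0' then (t.count '1' : Int) else 0) + pairsZ t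

-- number of (i,j) pairs with i<j, l[i]='1', l[j]='0'
def pairsX : List Char → Int
  | [] => 0
  | c :: t => (if c = '1' then (t.count '0' : Int) else 0) + pairsX t

theorem aFold_eq (l : List Char) (s c : Int) :
    (l.foldl
      (fun (sc : Int × Int) ch =>
        let s' := if ch = '0' then sc.1 + 1 else sc.1
        let c' := if ch = '1' then sc.2 + s' else sc.2
        (s', c')) (s, c)).2 = c + s * (l.count '1' : Int) + pairsZ l := by
  induction l generalizing s c with
  | nil => simp [pairsZ]
  | cons x t ih =>
    by_cases h0 : x = '0' <;> by_cases h1 : x = '1' <;>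
      simp_all [pairsZ] <;> ring

theorem bFold_eq (l : List Char) (r a : Int) :
    (l.foldl
      (fun (ra : Int × Int) ch =>
        if ch = '1' then (ra.1 - 1, ra.2)
        else if ch = '0' then (ra.1, ra.2 + ra.1)
        else ra) (r, a)).2 = a + r * (l.count '0' : Int) - pairsX l := by
  induction l generalizing r a with
  | nil => simp [pairsX]
  | cons x t ih =>
    by_cases h0 : x = '0' <;> by_cases h1 : x = '1' <;>
      simp_all [pairsX] <;> ring

theorem pairs_sum (l : List Char) :
    pairsZ l + pairsX l = (l.count '0' : Int) * (l.count '1' : Int) := by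
  induction l with
  | nil => simp [pairsZ, pairsX]
  | cons x t ih =>
    by_cases h0 : x = '0' <;> by_cases h1 : x = '1' <;>
      simp_all [pairsZ, pairsX, List.count_cons] <;> push_cast <;> ring_nf <;>
      nlinarith [ih]

-- ===== VERDICT (by name: the statement is the Claim_ definition above) =====
theorem pair_maker_spec : Claim_equal_pair_maker := by
  intro bits _
  unfold Spec_pair_maker pair_maker pair_maker_alt
  have hb := bFold_eq bits.toList ((bits.toList.count '1' : Int)) 0
  have hsum := pairs_sum bits.toList
  by_cases h : PySem.Str.len bits < 1
  · have : bits.toList = [] := by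
      have := PySem.Str.len_eq bits
      cases hl : bits.toList with
      | nil => rfl
      | cons y t => simp [hl] at h ⊢; omega
    simp [h, this]
  · simp only [h, if_false]
    rw [PySem.Str.len_eq] at *
    have hfold := PySem.List.foldl_pyRange_pyGetD (xs := bits.toList)
      (f := fun (sc : Int × Int) temp =>
        let s := if temp = '0' then sc.1 + 1 else sc.1
        let c := if temp = '1' then sc.2 + s else sc.2
        (s, c)) (d := ' ') (init := ((0 : Int), (0 : Int))) (a := 0) (by omega)
    simp only [Int.toNat_zero, List.drop_zero, PySem.List.len_eq] at hfold
    rw [hfold, aFold_eq, hb]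
    have hc := mul_comm ((bits.toList.count '1' : Int)) ((bits.toList.count '0' : Int))
    linarith [hsum, hc]
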